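-- pv_equiv track=rewrite | github.com/wesleyjholt/nlmixr2-python | tests/test_integration.py | _subset_subjects
-- ===== SOURCE A (Python) =====
-- def _subset_subjects(data, subject_ids):
--     """Return a subset of data keeping only the given subject IDs."""
--     keep = set(subject_ids)
--     out = {k: [] for k in data}
--     for i, sid in enumerate(data["id"]):
--         if sid in keep:
--             for k in data:
--                 out[k].append(data[k][i])
--     return out
-- ===== SOURCE B (Python) =====
-- def _subset_subjects(data, subject_ids):
--     """Return a subset of data keeping only the given subject IDs."""
--     keep = set(subject_ids)
--     cols = list(data)
--     pos = cols.index("id")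
--     rows = [r for r in zip(*(data[k] for k in cols)) if r[pos] in keep]
--     return {k: [r[j] for r in rows] for j, k in enumerate(cols)}
-- ===== Notes on version B (the rewrite author's own statement) =====
-- stated objective: alternative
-- what changed: B transposes the columns into row tuples with zip(*...), filters whole rows by the id field at its column position, and transposes back with a per-position dict comprehension, instead of A's dict of growing lists fed by interleaved per-row appends.
import Mathlib
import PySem

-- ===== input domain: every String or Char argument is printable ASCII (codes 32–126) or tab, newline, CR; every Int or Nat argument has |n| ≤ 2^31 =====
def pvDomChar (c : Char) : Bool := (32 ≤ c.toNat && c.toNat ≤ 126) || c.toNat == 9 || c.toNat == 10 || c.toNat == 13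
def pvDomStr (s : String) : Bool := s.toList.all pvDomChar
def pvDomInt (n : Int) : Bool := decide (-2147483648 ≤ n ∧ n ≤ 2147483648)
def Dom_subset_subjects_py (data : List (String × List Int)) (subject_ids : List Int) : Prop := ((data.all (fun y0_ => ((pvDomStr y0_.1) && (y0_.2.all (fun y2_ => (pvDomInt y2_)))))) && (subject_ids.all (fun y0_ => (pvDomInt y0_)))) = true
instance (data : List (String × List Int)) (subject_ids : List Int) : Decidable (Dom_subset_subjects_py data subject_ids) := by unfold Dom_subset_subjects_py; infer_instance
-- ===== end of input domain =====

-- B transposes the columns into row tuples (Python zip(*...)), filters whole rows by the id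
-- field, and transposes back — a different data layout than A's dict of growing lists
-- (objective: alternative; same asymptotic cost).

-- ===== PORT A =====
-- keep = set(subject_ids); out = {k: [] for k in data};
-- for i, sid in enumerate(data["id"]): if sid in keep: for k in data: out[k].append(data[k][i])
def subset_subjects_py (data : List (String × List Int)) (subject_ids : List Int) : List (String × List Int) :=
  let d : PySem.Dict String (List Int) := PySem.Dict.ofList data
  let keep : PySem.Set Int := PySem.Set.ofList subject_ids
  let out0 : PySem.Dict String (List Int) :=
    d.keys.foldl (fun o k => o.insert k ([] : List Int)) PySem.Dict.empty
  -- data["id"]: KeyError when missing (outside Pre_); data[k][i]: IndexError out of range (outside Pre_)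
  let out :=
    (PySem.List.enumerate (d.getD "id" []) 0).foldl
      (fun o p =>
        if keep.contains p.2 then
          d.keys.foldl (fun o2 k => o2.modify k [] (fun l => l ++ [PySem.List.pyGetD (d.getD k []) p.1 0])) o
        else o) out0
  out.items

-- ===== PORT B =====
-- helper: Python zip(*columns) — row tuples, truncated at the shortest column
def pyZip (cs : List (List Int)) : List (List Int) :=
  if h : cs = [] then []
  else if h2 : cs.any (fun c => c.isEmpty) then []
  else (cs.map (fun c => c.headD 0)) :: pyZip (cs.map (fun c => c.tail))
termination_by (cs.headD []).length
decreasing_by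
  rcases cs with _ | ⟨c, t⟩
  · exact absurd rfl h
  · rcases c with _ | ⟨a, as⟩
    · exact absurd (by simp) h2
    · simp

-- keep = set(subject_ids); cols = list(data); pos = cols.index("id");
-- rows = [r for r in zip(*(data[k] for k in cols)) if r[pos] in keep];
-- return {k: [r[j] for r in rows] for j, k in enumerate(cols)}
def subset_subjects_py_alt (data : List (String × List Int)) (subject_ids : List Int) : List (String × List Int) :=
  let d : PySem.Dict String (List Int) := PySem.Dict.ofList data
  let keep : PySem.Set Int := PySem.Set.ofList subject_ids
  let cols : List String := d.keys
  -- cols.index("id"): ValueError when "id" is missing (outside Pre_)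
  let pos : Int := (((PySem.List.index? cols "id").getD 0 : Nat) : Int)
  let rows : List (List Int) :=
    (pyZip (cols.map (fun k => d.getD k []))).filter
      (fun r => keep.contains (PySem.List.pyGetD r pos 0))
  (PySem.List.enumerate cols 0).map
    (fun jk => (jk.2, rows.map (fun r => PySem.List.pyGetD r jk.1 0)))

-- ===== PRECONDITION & SPEC =====
-- Pre_ excludes exactly the inputs where the Python A raises: a missing "id" key (KeyError),
-- and rows whose id is kept but whose index is out of range in some column (IndexError).
def Pre_subset_subjects_py (data : List (String × List Int)) (subject_ids : List Int) : Prop :=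
  (PySem.Dict.ofList data).contains "id" = true ∧
  ((PySem.List.enumerate ((PySem.Dict.ofList data).getD "id" []) 0).all
     (fun p => !(subject_ids.contains p.2) ||
               (PySem.Dict.ofList data).values.all (fun col => p.1 < (col.length : Int)))) = true
instance (data : List (String × List Int)) (subject_ids : List Int) : Decidable (Pre_subset_subjects_py data subject_ids) := by unfold Pre_subset_subjects_py; infer_instance
def pvWitness_subset_subjects_py : (List (String × List Int)) × List Int :=
  ([("id", [1, 2, 3]), ("x", [10, 20, 30])], [1, 3])

def Spec_subset_subjects_py (data : List (String × List Int)) (subject_ids : List Int) (out : List (String × List Int)) : Prop := out = subset_subjects_py_alt data subject_ids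
instance (data : List (String × List Int)) (subject_ids : List Int) (out : List (String × List Int)) : Decidable (Spec_subset_subjects_py data subject_ids out) := by unfold Spec_subset_subjects_py; infer_instance

-- ===== CLAIM (what is proved, stated in full; the proofs are below) =====
def Claim_equal_subset_subjects_py : Prop := ∀ (data : List (String × List Int)) (subject_ids : List Int), Dom_subset_subjects_py data subject_ids → Pre_subset_subjects_py data subject_ids → Spec_subset_subjects_py data subject_ids (subset_subjects_py data subject_ids)

-- ===== LEMMAS AND PROOFS =====

-- canonical column-major form both ports are reduced to
def canonSS (data : List (String × List Int)) (subject_ids : List Int) : List (String × List Int) :=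
  let d : PySem.Dict String (List Int) := PySem.Dict.ofList data
  let keep : PySem.Set Int := PySem.Set.ofList subject_ids
  let idx : List Int :=
    ((PySem.List.enumerate (d.getD "id" []) 0).filter (fun p => keep.contains p.2)).map (·.1)
  d.keys.map (fun k => (k, idx.map (fun i => PySem.List.pyGetD (d.getD k []) i 0)))

-- ---- A side ----

theorem inner_getD (g : String → Int) (ks : List String) (hnd : ks.Nodup)
    (o : PySem.Dict String (List Int)) (c : String) :
    ((ks.foldl (fun o2 k => o2.modify k [] (fun l => l ++ [g k])) o).getD c []) =
      if c ∈ ks then o.getD c [] ++ [g c] else o.getD c [] := by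
  induction ks generalizing o with
  | nil => simp
  | cons k t ih =>
    simp only [List.foldl_cons]
    rw [ih (by simp_all) ]
    rcases List.nodup_cons.mp hnd with ⟨hk, hnt⟩
    by_cases hc : c ∈ t
    · have : c ≠ k := fun h => hk (h ▸ hc)
      simp [hc, this, PySem.Dict.getD_modify]
    · by_cases hck : c = k
      · subst hck; simp [hc, PySem.Dict.getD_modify]
      · simp [hc, hck, PySem.Dict.getD_modify]

theorem inner_keys (g : String → Int) (ks : List String)
    (o : PySem.Dict String (List Int)) (hsub : ∀ k ∈ ks, k ∈ o.keys) :
    ((ks.foldl (fun o2 k => o2.modify k [] (fun l => l ++ [g k])) o).keys) = o.keys := by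
  induction ks generalizing o with
  | nil => simp
  | cons k t ih =>
    simp only [List.foldl_cons]
    have hk : k ∈ o.keys := hsub k (by simp)
    have hkeys : (o.modify k [] (fun l => l ++ [g k])).keys = o.keys := by
      rw [PySem.Dict.keys_modify, PySem.Dict.keys_insert_of_contains]
      exact (PySem.Dict.contains_iff_mem_keys o k).mpr hk
    rw [ih _ (by intro x hx; rw [hkeys]; exact hsub x (by simp [hx])), hkeys]

theorem outer_invariant (d : PySem.Dict String (List Int)) (keep : PySem.Set Int)
    (hnd : d.keys.Nodup) :
    ∀ (ps : List (Int × Int)) (o : PySem.Dict String (List Int)), o.keys = d.keys →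
      (((ps.foldl (fun o p =>
          if keep.contains p.2 then
            d.keys.foldl (fun o2 k => o2.modify k [] (fun l => l ++ [PySem.List.pyGetD (d.getD k []) p.1 0])) o
          else o) o).keys = d.keys) ∧
       (∀ c ∈ d.keys,
         (ps.foldl (fun o p =>
            if keep.contains p.2 then
              d.keys.foldl (fun o2 k => o2.modify k [] (fun l => l ++ [PySem.List.pyGetD (d.getD k []) p.1 0])) o
            else o) o).getD c [] =
          o.getD c [] ++ (ps.filter (fun p => keep.contains p.2)).map
            (fun p => PySem.List.pyGetD (d.getD c []) p.1 0))) := by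
  intro ps
  induction ps with
  | nil => intro o ho; simp [ho]
  | cons p t ih =>
    intro o ho
    simp only [List.foldl_cons]
    by_cases hp : keep.contains p.2
    · rw [if_pos hp]
      have hkeys : ((d.keys.foldl (fun o2 k => o2.modify k [] (fun l => l ++ [PySem.List.pyGetD (d.getD k []) p.1 0])) o).keys) = d.keys := by
        rw [inner_keys _ _ _ (fun k hk => ho ▸ hk), ho]
      obtain ⟨h1, h2⟩ := ih _ hkeys
      refine ⟨h1, ?_⟩
      intro c hc
      rw [h2 c hc, inner_getD _ _ hnd, if_pos hc]
      have hm : p.2 ∈ keep := (PySem.Set.contains_iff keep p.2).mp hp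
      simp [List.filter_cons, hm]
    · rw [if_neg hp]
      obtain ⟨h1, h2⟩ := ih o ho
      refine ⟨h1, ?_⟩
      intro c hc
      rw [h2 c hc]
      have hm : p.2 ∉ keep := fun h => hp ((PySem.Set.contains_iff keep p.2).mpr h)
      simp [List.filter_cons, hm]

theorem foldl_insert_nil_getD (ks : List String) (c : String) :
    ((ks.foldl (fun o k => o.insert k ([] : List Int)) PySem.Dict.empty).getD c []) = [] := by
  suffices h : ∀ o : PySem.Dict String (List Int), o.getD c [] = [] →
      ((ks.foldl (fun o k => o.insert k ([] : List Int)) o).getD c []) = [] by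
    exact h _ (by simp [PySem.Dict.getD, PySem.Dict.empty, PySem.Dict.get?])
  induction ks with
  | nil => intro o ho; simpa using ho
  | cons k t ih =>
    intro o ho
    simp only [List.foldl_cons]
    exact ih _ (by rw [PySem.Dict.getD_insert]; split <;> simp [ho])

theorem foldl_insert_nil_keys (ks : List String) (hnd : ks.Nodup) :
    ((ks.foldl (fun o k => o.insert k ([] : List Int)) PySem.Dict.empty).keys) = ks := by
  rw [PySem.Dict.keys_foldl_insert]
  show PySem.Set.update (PySem.Set.ofList []) ks = ks
  rw [show PySem.Set.update (PySem.Set.ofList []) ks = PySem.Set.ofList ks from rfl]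
  exact PySem.Set.ofList_eq_self_of_nodup _ hnd

theorem A_eq_canon (data : List (String × List Int)) (subject_ids : List Int) :
    subset_subjects_py data subject_ids = canonSS data subject_ids := by
  unfold subset_subjects_py canonSS
  simp only []
  set d : PySem.Dict String (List Int) := PySem.Dict.ofList data with hd
  set keep : PySem.Set Int := PySem.Set.ofList subject_ids with hkeep
  have hnd : d.keys.Nodup := PySem.Dict.nodup_keys_ofList data
  have hkeys0 : ((d.keys.foldl (fun o k => o.insert k ([] : List Int)) PySem.Dict.empty).keys) = d.keys :=
    foldl_insert_nil_keys d.keys hnd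
  obtain ⟨h1, h2⟩ := outer_invariant d keep hnd (PySem.List.enumerate (d.getD "id" []) 0) _ hkeys0
  rw [PySem.Dict.items_eq_map_keys _ (by rw [h1]; exact hnd) ([] : List Int), h1]
  apply List.map_congr_left
  intro k hk
  rw [h2 k hk, foldl_insert_nil_getD]
  simp [List.map_map, Function.comp]

-- ---- B side ----

-- length of the shortest column = number of rows Python's zip produces
def pvMlen : List (List Int) → Nat
  | [] => 0
  | [c] => c.length
  | c :: t => min c.length (pvMlen t)

theorem pvMlen_le (cs : List (List Int)) (c : List Int) (hc : c ∈ cs) : pvMlen cs ≤ c.length := by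
  induction cs with
  | nil => simp at hc
  | cons x t ih =>
    rcases t with _ | ⟨y, t'⟩
    · simp at hc; subst hc; simp [pvMlen]
    · rcases List.mem_cons.mp hc with h1 | h1
      · subst h1; simp [pvMlen]
      · exact le_trans (by simp [pvMlen]) (ih h1)

theorem lt_pvMlen (cs : List (List Int)) (hne : cs ≠ []) (i : Nat)
    (h : ∀ c ∈ cs, i < c.length) : i < pvMlen cs := by
  induction cs with
  | nil => exact absurd rfl hne
  | cons x t ih =>
    rcases t with _ | ⟨y, t'⟩
    · simpa [pvMlen] using h x (by simp)
    · have h1 := h x (by simp)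
      have h2 := ih (by simp) (fun c hc => h c (by simp [hc]))
      simp [pvMlen]; exact ⟨h1, by simpa [pvMlen] using h2⟩

theorem pvMlen_tail (cs : List (List Int)) (hne : cs ≠ [])
    (h : cs.any (fun c => c.isEmpty) = false) :
    pvMlen cs = pvMlen (cs.map List.tail) + 1 := by
  induction cs with
  | nil => exact absurd rfl hne
  | cons x t ih =>
    have hx : x ≠ [] := by
      intro hx; subst hx; simp at h
    have hxl : 0 < x.length := List.length_pos_iff.mpr hx
    rcases t with _ | ⟨y, t'⟩
    · simp [pvMlen, List.length_tail]; omega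
    · have ht := ih (by simp) (by simp at h ⊢; exact h.2)
      simp only [List.map_cons] at ht ⊢
      simp only [pvMlen] at ht ⊢
      rw [ht]
      simp [List.length_tail]; omega

theorem pyZip_eq_aux (n : Nat) : ∀ (cs : List (List Int)), cs ≠ [] → (cs.headD []).length = n →
    pyZip cs = (List.range (pvMlen cs)).map (fun i => cs.map (fun c => c.getD i 0)) := by
  induction n using Nat.strong_induction_on with
  | _ n ih =>
    intro cs hne hn
    rw [pyZip, dif_neg hne]
    by_cases h2 : cs.any (fun c => c.isEmpty)
    · rw [dif_pos h2]
      obtain ⟨c, hc, hce⟩ := List.any_eq_true.mp h2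
      have h0 : c.length = 0 := by
        rw [List.isEmpty_iff.mp hce]; rfl
      have := pvMlen_le cs c hc
      have hm0 : pvMlen cs = 0 := by omega
      simp [hm0]
    · rw [dif_neg h2]
      have hmt : cs.map List.tail ≠ [] := by
        simpa [List.map_eq_nil_iff] using hne
      rcases cs with _ | ⟨c, t⟩
      · exact absurd rfl hne
      have hc : c ≠ [] := by
        intro hc; exact h2 (by simp [hc])
      have hlt : (((c :: t).map List.tail).headD []).length < n := by
        simp only [List.map_cons, List.headD_cons] at hn ⊢
        have := List.length_pos_iff.mpr hc
        simp [List.length_tail]; omega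
      have hfalse : ((c :: t).any fun c => c.isEmpty) = false := Bool.eq_false_iff.mpr h2
      rw [ih _ hlt _ hmt rfl, pvMlen_tail (c :: t) hne hfalse, List.range_succ_eq_map]
      conv_rhs => rw [List.map_cons, List.map_map]
      refine congrArg₂ List.cons ?_ ?_
      · apply List.map_congr_left
        intro x _
        cases x <;> simp
      · apply List.map_congr_left
        intro i _
        simp only [Function.comp, List.map_map]
        apply List.map_congr_left
        intro x _
        cases x <;> simp

theorem pyZip_eq (cs : List (List Int)) (hne : cs ≠ []) :
    pyZip cs = (List.range (pvMlen cs)).map (fun i => cs.map (fun c => c.getD i 0)) :=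
  pyZip_eq_aux (cs.headD []).length cs hne rfl

theorem enum_filter_map {β : Type} (xs : List Int) (q : Int → Bool) (f : Int → β) (s : Nat) :
    ((PySem.List.enumerate xs (s : Int)).filter (fun p => q p.2)).map (fun p => f p.1)
      = ((List.range xs.length).filter (fun i => q (xs.getD i 0))).map
          (fun i => f (((s + i : Nat) : Int))) := by
  induction xs generalizing s with
  | nil => simp [PySem.List.enumerate_nil]
  | cons x t ih =>
    rw [PySem.List.enumerate_cons]
    have hcast : (s : Int) + 1 = ((s + 1 : Nat) : Int) := by push_cast; ring
    rw [List.length_cons, List.range_succ_eq_map]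
    rw [List.filter_cons, List.filter_cons]
    have htail :
        ((((List.range t.length).map Nat.succ).filter
            (fun i => q ((x :: t).getD i 0))).map (fun i => f (((s + i : Nat) : Int))))
          = ((PySem.List.enumerate t ((s : Int) + 1)).filter (fun p => q p.2)).map (fun p => f p.1) := by
      rw [hcast, ih (s + 1), List.filter_map, List.map_map]
      rw [List.filter_congr (l := List.range t.length)
            (q := fun i => q (t.getD i 0))
            (by intro i _; simp [Function.comp, List.getD_cons_succ])]
      apply List.map_congr_left
      intro i _
      simp only [Function.comp, Nat.succ_eq_add_one]
      congr 1
      omega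
    by_cases hx : q x
    · simp only [List.getD_cons_zero, hx, if_pos, List.map_cons]
      exact congrArg₂ List.cons (by norm_num) htail.symm
    · simp only [List.getD_cons_zero, hx, Bool.false_eq_true, if_false]
      exact htail.symm

theorem filter_range_eq (p : Nat → Bool) (m n : Nat) (hmn : m ≤ n)
    (h : ∀ i, m ≤ i → i < n → p i = false) :
    (List.range n).filter p = (List.range m).filter p := by
  have hn : n = m + (n - m) := by omega
  rw [hn, List.range_add, List.filter_append]
  have h0 : ((List.range (n - m)).map (fun i => m + i)).filter p = [] := by
    rw [List.filter_eq_nil_iff]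
    intro a ha
    obtain ⟨i, hi, rfl⟩ := List.mem_map.mp ha
    simp at hi
    simp [h (m + i) (by omega) (by omega)]
  rw [h0, List.append_nil]

theorem getD_map_of_lt {α β : Type} (l : List α) (f : α → β) (n : Nat) (h : n < l.length)
    (dd : β) (d0 : α) : (l.map f).getD n dd = f (l.getD n d0) := by
  rw [List.getD_eq_getElem?_getD, List.getElem?_map, List.getElem?_eq_getElem h,
      List.getD_eq_getElem l d0 h]
  rfl

theorem enum_filter_map0 {β : Type} (xs : List Int) (q : Int → Bool) (f : Int → β) :
    ((PySem.List.enumerate xs 0).filter (fun p => q p.2)).map (fun p => f p.1)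
      = ((List.range xs.length).filter (fun i => q (xs.getD i 0))).map
          (fun i => f ((i : Nat) : Int)) := by
  simpa using enum_filter_map xs q f 0

theorem alt_eq_canon (data : List (String × List Int)) (subject_ids : List Int)
    (hpre : Pre_subset_subjects_py data subject_ids) :
    subset_subjects_py_alt data subject_ids = canonSS data subject_ids := by
  obtain ⟨hid, hbound⟩ := hpre
  unfold subset_subjects_py_alt canonSS
  simp only []
  set d : PySem.Dict String (List Int) := PySem.Dict.ofList data with hd
  set keep : PySem.Set Int := PySem.Set.ofList subject_ids with hk
  have hnd : d.keys.Nodup := PySem.Dict.nodup_keys_ofList data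
  have hmem : "id" ∈ d.keys := (PySem.Dict.contains_iff_mem_keys d "id").mp hid
  obtain ⟨pnat, hpn⟩ := Option.isSome_iff_exists.mp ((PySem.List.index?_isSome_iff d.keys "id").mpr hmem)
  obtain ⟨hplt, hkeyp, -⟩ := PySem.List.getElem_of_index?_eq_some hpn
  set cs : List (List Int) := d.keys.map (fun k => d.getD k []) with hcs
  have hcslen : cs.length = d.keys.length := by rw [hcs, List.length_map]
  have hcsne : cs ≠ [] := by
    rw [hcs]; simp only [ne_eq, List.map_eq_nil_iff]
    exact List.ne_nil_of_mem hmem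
  have hvals : d.values = cs := PySem.Dict.values_eq_map_keys d hnd []
  set idc : List Int := d.getD "id" [] with hidc
  have hkeyD : d.keys.getD pnat "" = "id" := by
    rw [List.getD_eq_getElem d.keys "" hplt, hkeyp]
  have hcsp : cs.getD pnat [] = idc := by
    rw [hcs, getD_map_of_lt d.keys _ pnat hplt [] "", hkeyD]
  have hmle : pvMlen cs ≤ idc.length := by
    have hmm : cs.getD pnat [] ∈ cs := by
      rw [List.getD_eq_getElem cs [] (by omega)]
      exact List.getElem_mem _
    have := pvMlen_le cs (cs.getD pnat []) hmm
    rwa [hcsp] at this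
  have hkc : ∀ x : Int, keep.contains x = subject_ids.contains x := by
    intro x
    by_cases hx : x ∈ subject_ids
    · rw [(PySem.Set.contains_iff keep x).mpr ((PySem.Set.mem_ofList subject_ids x).mpr hx)]
      exact (List.contains_iff_mem.mpr hx).symm
    · have h1 : ¬ keep.contains x := fun hcc =>
        hx ((PySem.Set.mem_ofList subject_ids x).mp ((PySem.Set.contains_iff keep x).mp hcc))
      rw [Bool.eq_false_iff.mpr h1]
      exact (Bool.eq_false_iff.mpr (fun hcc => hx (List.contains_iff_mem.mp hcc))).symm
  -- rows in indexed form
  rw [hpn]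
  simp only [Option.getD_some]
  rw [pyZip_eq cs hcsne, List.filter_map]
  have hcfc : ∀ i ∈ List.range (pvMlen cs),
      ((fun r => keep.contains (PySem.List.pyGetD r ((pnat : Nat) : Int) 0)) ∘
        (fun i => cs.map (fun c => c.getD i 0))) i
        = (fun i => keep.contains (idc.getD i 0)) i := by
    intro i _
    simp only [Function.comp, PySem.List.pyGetD_natCast]
    rw [getD_map_of_lt cs _ pnat (by omega) 0 [], hcsp]
  rw [List.filter_congr hcfc]
  -- bound: beyond the shortest column no row is kept
  have hout : ∀ i, pvMlen cs ≤ i → i < idc.length → keep.contains (idc.getD i 0) = false := by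
    intro i hmi hilen
    by_contra hcc
    have hcc' : keep.contains (idc.getD i 0) = true := by
      cases hhh : keep.contains (idc.getD i 0)
      · exact absurd hhh hcc
      · rfl
    have hpmem : ((0 : Int) + (i : Nat), idc[i]) ∈ PySem.List.enumerate idc 0 :=
      (PySem.List.mem_enumerate_iff idc 0 _).mpr ⟨i, hilen, rfl⟩
    have hb := List.all_eq_true.mp hbound _ hpmem
    rw [List.getD_eq_getElem idc 0 hilen, hkc] at hcc'
    simp only [hcc', Bool.not_true, Bool.false_or] at hb
    have hlt : i < pvMlen cs := by
      apply lt_pvMlen cs hcsne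
      intro c hcmem
      have hc := List.all_eq_true.mp hb c (hvals ▸ hcmem)
      simp only [zero_add, decide_eq_true_eq] at hc
      exact_mod_cast hc
    omega
  -- outer: compare entrywise
  apply List.ext_getElem
  · simp [PySem.List.length_enumerate]
  · intro j hj1 hj2
    rw [List.length_map] at hj2
    rw [List.getElem_map, List.getElem_map, PySem.List.getElem_enumerate]
    simp only [zero_add]
    refine Prod.ext rfl ?_
    show (((List.range (pvMlen cs)).filter (fun i => keep.contains (idc.getD i 0))).map
        (fun i => cs.map (fun c => c.getD i 0))).map
          (fun r => PySem.List.pyGetD r ((j : Nat) : Int) 0)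
      = (((PySem.List.enumerate idc 0).filter (fun p => keep.contains p.2)).map (·.1)).map
          (fun i => PySem.List.pyGetD (d.getD (d.keys[j]'hj2) []) i 0)
    rw [List.map_map, List.map_map]
    rw [show (((PySem.List.enumerate idc 0).filter (fun p => keep.contains p.2)).map
          ((fun i => PySem.List.pyGetD (d.getD (d.keys[j]'hj2) []) i 0) ∘ (·.1)))
        = ((PySem.List.enumerate idc 0).filter (fun p => keep.contains p.2)).map
          (fun p => PySem.List.pyGetD (d.getD (d.keys[j]'hj2) []) p.1 0) from rfl]
    rw [enum_filter_map0 idc (fun v => keep.contains v)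
          (fun i => PySem.List.pyGetD (d.getD (d.keys[j]'hj2) []) i 0),
        filter_range_eq _ _ _ hmle hout]
    apply List.map_congr_left
    intro i _
    simp only [Function.comp, PySem.List.pyGetD_natCast]
    rw [getD_map_of_lt cs _ j (by omega) 0 []]
    rw [hcs, getD_map_of_lt d.keys _ j hj2 [] "", List.getD_eq_getElem d.keys "" hj2]

-- ===== VERDICT (by name: the statement is the Claim_ definition above) =====
theorem subset_subjects_py_spec : Claim_equal_subset_subjects_py := by
  intro data subject_ids _ hpre
  unfold Spec_subset_subjects_py
  rw [A_eq_canon, alt_eq_canon data subject_ids hpre]
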